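-- pv_equiv track=rewrite | github.com/sleakly/IoTScout | smart_devices/handlers/hue.py | _resolve_hue_target
-- ===== SOURCE A (Python) =====
-- def _resolve_hue_target(target: str, lights_map: dict) -> str:
--     if not target:
--         raise ValueError("Empty target")
--     if target.isdigit():
--         idx = int(target) - 1
--         names = list(lights_map.keys())
--         if idx < 0 or idx >= len(names):
--             raise IndexError("index out of range")
--         return names[idx]
--     if target in lights_map:
--         return target
--     for n in lights_map.keys():
--         if n.lower() == target.lower():
--             return n
--     for n in lights_map.keys():
--         if target.lower() in n.lower():
--             return n
--     raise LookupError(f"No light matching: {target}")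
-- ===== SOURCE B (Python) =====
-- def _resolve_hue_target(target: str, lights_map: dict) -> str:
--     if not target:
--         raise ValueError("Empty target")
--     if target.isdigit():
--         idx = int(target) - 1
--         if not 0 <= idx < len(lights_map):
--             raise IndexError("index out of range")
--         return list(lights_map)[idx]
--     if target in lights_map:
--         return target
--     t = target.lower()
--     exact = None
--     sub = None
--     for n in lights_map.keys():
--         nl = n.lower()
--         if exact is None and nl == t:
--             exact = n
--         if sub is None and t in nl:
--             sub = n
--     if exact is not None:
--         return exact
--     if sub is not None:
--         return sub
--     raise LookupError(f"No light matching: {target}")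
-- ===== Notes on version B (the rewrite author's own statement) =====
-- stated objective: alternative
-- what changed: The two separate fallback loops over the keys (one for a case-insensitive exact match, one for a substring match) are merged into a single pass that tracks the first exact-lower and first substring match in two variables, preserving the exact-over-substring priority.
import Mathlib
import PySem

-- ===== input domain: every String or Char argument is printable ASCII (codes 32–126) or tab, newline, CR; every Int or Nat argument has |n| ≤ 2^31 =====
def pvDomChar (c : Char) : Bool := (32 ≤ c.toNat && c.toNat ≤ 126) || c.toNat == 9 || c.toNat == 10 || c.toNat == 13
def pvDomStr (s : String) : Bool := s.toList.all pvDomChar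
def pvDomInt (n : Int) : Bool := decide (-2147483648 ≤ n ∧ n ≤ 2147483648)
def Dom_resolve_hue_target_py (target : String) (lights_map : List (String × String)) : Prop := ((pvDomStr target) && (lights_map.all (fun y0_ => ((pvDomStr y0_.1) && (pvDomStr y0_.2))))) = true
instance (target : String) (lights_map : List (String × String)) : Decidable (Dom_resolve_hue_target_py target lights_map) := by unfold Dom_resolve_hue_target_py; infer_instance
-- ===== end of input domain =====

-- B merges A's two fallback loops over the keys into one pass that tracks the first
-- case-insensitive-exact and the first substring match, keeping exact-over-substring priority.


-- ===== PORT A =====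
-- literal port of A; where the Python raises (empty target, index out of range,
-- no match at all) the port returns "" — exactly those inputs are excluded by Pre_.
def resolve_hue_target_py (target : String) (lights_map : List (String × String)) : String :=
  if target = "" then ""
  else if PySem.Str.strIsdigit target then
    let idx : Int := (PySem.Int.ofStr? target).getD 0 - 1
    let names := lights_map.map (·.1)
    if idx < 0 ∨ (names.length : Int) ≤ idx then ""
    else (PySem.List.pyGet? names idx).getD ""
  else if (lights_map.map (·.1)).contains target then target
  else
    match (lights_map.map (·.1)).find?
        (fun n => PySem.Str.lower n == PySem.Str.lower target) with
    | some n => n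
    | none =>
      match (lights_map.map (·.1)).find?
          (fun n => PySem.Str.isIn (PySem.Str.lower target) (PySem.Str.lower n)) with
      | some n => n
      | none => ""

-- ===== PORT B =====
-- single pass: fold over the keys keeping (first exact-lower match, first substring match).
def resolve_hue_target_py_alt (target : String) (lights_map : List (String × String)) : String :=
  if target = "" then ""
  else if PySem.Str.strIsdigit target then
    let idx : Int := (PySem.Int.ofStr? target).getD 0 - 1
    if 0 ≤ idx ∧ idx < (lights_map.length : Int) then
      (PySem.List.pyGet? (lights_map.map (·.1)) idx).getD ""
    else ""
  else if (lights_map.map (·.1)).contains target then target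
  else
    let t := PySem.Str.lower target
    let p := lights_map.foldl
      (fun (acc : Option String × Option String) kv =>
        let nl := PySem.Str.lower kv.1
        ((if acc.1.isNone && (nl == t) then some kv.1 else acc.1),
         (if acc.2.isNone && PySem.Str.isIn t nl then some kv.1 else acc.2)))
      (none, none)
    match p.1 with
    | some n => n
    | none =>
      match p.2 with
      | some n => n
      | none => ""

-- ===== PRECONDITION & SPEC =====
-- Pre_ excludes exactly the inputs on which A raises: empty target (ValueError),
-- a digit target whose index is out of range (IndexError), and a non-digit target
-- with no exact, case-insensitive or substring match (LookupError).
def Pre_resolve_hue_target_py (target : String) (lights_map : List (String × String)) : Prop :=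
  target ≠ "" ∧
  (if PySem.Str.strIsdigit target then
     1 ≤ (PySem.Int.ofStr? target).getD 0 ∧
       (PySem.Int.ofStr? target).getD 0 ≤ (lights_map.length : Int)
   else
     ∃ p ∈ lights_map, p.1 = target ∨
       PySem.Str.lower p.1 = PySem.Str.lower target ∨
       PySem.Str.isIn (PySem.Str.lower target) (PySem.Str.lower p.1) = true)
instance (target : String) (lights_map : List (String × String)) : Decidable (Pre_resolve_hue_target_py target lights_map) := by unfold Pre_resolve_hue_target_py; infer_instance

def pvWitness_resolve_hue_target_py : String × (List (String × String)) :=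
  ("desk", [("Desk Lamp", "1"), ("Kitchen", "2")])

def Spec_resolve_hue_target_py (target : String) (lights_map : List (String × String)) (out : String) : Prop := out = resolve_hue_target_py_alt target lights_map
instance (target : String) (lights_map : List (String × String)) (out : String) : Decidable (Spec_resolve_hue_target_py target lights_map out) := by unfold Spec_resolve_hue_target_py; infer_instance

-- ===== CLAIM (what is proved, stated in full; the proofs are below) =====
def Claim_equal_resolve_hue_target_py : Prop := ∀ (target : String) (lights_map : List (String × String)), Dom_resolve_hue_target_py target lights_map → Pre_resolve_hue_target_py target lights_map → Spec_resolve_hue_target_py target lights_map (resolve_hue_target_py target lights_map)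

-- ===== LEMMAS AND PROOFS =====

-- B's one-pass fold computes (first exact match, first substring match),
-- i.e. the results of A's two find? scans, for any starting accumulator.
theorem pvFoldPair (t : String) (l : List (String × String)) (a b : Option String) :
    l.foldl
      (fun (acc : Option String × Option String) kv =>
        let nl := PySem.Str.lower kv.1
        ((if acc.1.isNone && (nl == t) then some kv.1 else acc.1),
         (if acc.2.isNone && PySem.Str.isIn t nl then some kv.1 else acc.2)))
      (a, b)
    = (a.or ((l.map (·.1)).find? (fun n => PySem.Str.lower n == t)),
       b.or ((l.map (·.1)).find? (fun n => PySem.Str.isIn t (PySem.Str.lower n)))) := by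
  induction l generalizing a b with
  | nil => simp
  | cons kv rest ih =>
    simp only [List.foldl_cons, List.map_cons, List.find?_cons, ih]
    cases a <;> cases b <;>
      simp [Option.or, beq_iff_eq] <;> split_ifs <;> simp_all [beq_eq_decide]

-- ===== VERDICT (by name: the statement is the Claim_ definition above) =====
theorem resolve_hue_target_py_spec : Claim_equal_resolve_hue_target_py := by
  intro target lights_map _ _
  unfold Spec_resolve_hue_target_py resolve_hue_target_py resolve_hue_target_py_alt
  split_ifs with h1 h2 h3
  · rfl
  · simp only [List.length_map]
    split_ifs <;> (try rfl) <;> omega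
  · rfl
  · simp only [pvFoldPair, Option.none_or]
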